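-- pv_equiv track=rewrite | github.com/majormunky/advent_of_code | 2019/python/day2.py | arrange_operations
-- ===== SOURCE A (Python) =====
-- def arrange_operations(data):
--     result = []
--     temp_list = []
--     for code in data:
--         if len(temp_list) == 4:
--             # take care of full list
--             result.append(list(temp_list))
--
--             # reset our list
--             temp_list = []
--
--             # check to see if this new code is 99
--             # if it is, we need to just add it
--             if code == 99:
--                 result.append([99])
--             else:
--                 # our new code is not 99
--                 # so just add it to our new list
--                 temp_list.append(code)
--         else:
--             # add our code to the list
--             temp_list.append(code)
--     return result
-- ===== SOURCE B (Python) =====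
-- def arrange_operations(data):
--     data = list(data)
--     result = []
--     i = 0
--     while i + 4 < len(data):
--         result.append(data[i:i+4])
--         if data[i+4] == 99:
--             result.append([99])
--             i += 5
--         else:
--             i += 4
--     return result
-- ===== Notes on version B (the rewrite author's own statement) =====
-- stated objective: simpler
-- what changed: Replaced A's element-by-element accumulator fold (result, temp_list) with an index-based while loop that slices a whole chunk of four at once and inspects the following element for 99, advancing the index by 4 or 5.
import Mathlib
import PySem

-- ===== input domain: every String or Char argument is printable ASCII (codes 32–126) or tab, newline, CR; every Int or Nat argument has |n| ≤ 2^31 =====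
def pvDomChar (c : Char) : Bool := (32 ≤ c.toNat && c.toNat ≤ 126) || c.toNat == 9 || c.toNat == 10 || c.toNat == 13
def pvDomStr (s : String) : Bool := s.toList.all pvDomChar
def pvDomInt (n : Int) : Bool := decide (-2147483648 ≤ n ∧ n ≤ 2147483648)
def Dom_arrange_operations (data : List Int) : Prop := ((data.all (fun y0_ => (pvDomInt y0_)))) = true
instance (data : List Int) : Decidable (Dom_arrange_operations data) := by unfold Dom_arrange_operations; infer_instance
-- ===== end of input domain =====

-- B replaces A's element-by-element accumulator with an index/slice loop taking whole
-- chunks of four at once (objective: simpler, same cost).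

-- ===== PORT A =====
-- Python A: fold over the codes carrying (result, temp_list)
def pvStepA (s : List (List Int) × List Int) (code : Int) : List (List Int) × List Int :=
  let result := s.1
  let temp := s.2
  if temp.length = 4 then
    -- result.append(list(temp_list)); temp_list = []
    if code = 99 then (result ++ [temp] ++ [[99]], [])
    else (result ++ [temp], [code])
  else (result, temp ++ [code])

def arrange_operations (data : List Int) : List (List Int) :=
  (data.foldl pvStepA ([], [])).1

-- ===== PORT B =====
-- Python B: while i+4 < len(data): take the slice data[i:i+4], inspect data[i+4];
-- advancing the index by 4 or 5 corresponds to recursing on the matching suffix.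
def pvLoopB (rest : List Int) : List (List Int) :=
  match rest with
  | a :: b :: c :: d :: e :: rest' =>
      if e = 99 then [a, b, c, d] :: [99] :: pvLoopB rest'
      else [a, b, c, d] :: pvLoopB (e :: rest')
  | _ => []
termination_by rest.length
decreasing_by all_goals (simp; try omega)

def arrange_operations_alt (data : List Int) : List (List Int) :=
  pvLoopB data

-- ===== PRECONDITION & SPEC =====
def Spec_arrange_operations (data : List Int) (out : List (List Int)) : Prop := out = arrange_operations_alt data
instance (data : List Int) (out : List (List Int)) : Decidable (Spec_arrange_operations data out) := by unfold Spec_arrange_operations; infer_instance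

-- ===== CLAIM (what is proved, stated in full; the proofs are below) =====
def Claim_equal_arrange_operations : Prop := ∀ (data : List Int), Dom_arrange_operations data → Spec_arrange_operations data (arrange_operations data)

-- ===== LEMMAS AND PROOFS =====

theorem pvLoopB_short (temp : List Int) (h : temp.length ≤ 4) : pvLoopB temp = [] := by
  match temp with
  | [] => simp [pvLoopB]
  | [_] => simp [pvLoopB]
  | [_, _] => simp [pvLoopB]
  | [_, _, _] => simp [pvLoopB]
  | [_, _, _, _] => simp [pvLoopB]
  | _ :: _ :: _ :: _ :: _ :: _ => simp at h; omega

theorem pvFold_inv (data : List Int) :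
    ∀ (temp : List Int) (result : List (List Int)), temp.length ≤ 4 →
      (data.foldl pvStepA (result, temp)).1 = result ++ pvLoopB (temp ++ data) := by
  induction data with
  | nil =>
      intro temp result h
      simp [pvLoopB_short temp h]
  | cons c rest ih =>
      intro temp result h
      by_cases h4 : temp.length = 4
      · match temp, h4 with
        | [a, b, c', d], _ =>
          by_cases h99 : c = 99
          · subst h99
            have hs : pvStepA (result, [a, b, c', d]) 99
                = (result ++ [[a, b, c', d]] ++ [[99]], []) := by simp [pvStepA]
            rw [List.foldl_cons, hs, ih [] _ (by simp)]
            simp [pvLoopB]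
          · have hs : pvStepA (result, [a, b, c', d]) c
                = (result ++ [[a, b, c', d]], [c]) := by simp [pvStepA, h99]
            rw [List.foldl_cons, hs, ih [c] _ (by simp)]
            simp [pvLoopB, h99]
      · have h3 : temp.length ≤ 3 := by omega
        simp only [List.foldl_cons, pvStepA, if_neg h4]
        rw [ih (temp ++ [c]) result (by simp; omega)]
        simp

-- ===== VERDICT (by name: the statement is the Claim_ definition above) =====
theorem arrange_operations_spec : Claim_equal_arrange_operations := by
  intro data _
  unfold Spec_arrange_operations arrange_operations arrange_operations_alt
  simpa using pvFold_inv data [] [] (by simp)
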